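-- pv_equiv track=rewrite | github.com/harbor1981/aibox | api_gate/updateConfig.py | is_valid_new_value
-- ===== SOURCE A (Python) =====
-- def is_valid_new_value(value):
--     numbers = value.strip().split(';')
--     if len(numbers) != 8:
--         return False
--
--     for number in numbers:
--         try:
--             num = int(number)
--             if not (0 <= num <= 2000):
--                 return False
--         except ValueError:
--             return False
--
--     return True
-- ===== SOURCE B (Python) =====
-- def is_valid_new_value(value):
--     # Single left-to-right character scan with an accumulator: fields are cut at ';'
--     # and validated at each boundary; the field count is checked at the end.
--     count = 0
--     field = []
--     for ch in value.strip() + ';':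
--         if ch == ';':
--             try:
--                 n = int(''.join(field))
--             except ValueError:
--                 return False
--             if not (0 <= n <= 2000):
--                 return False
--             count += 1
--             field = []
--         else:
--             field.append(ch)
--     return count == 8
-- ===== Notes on version B (the rewrite author's own statement) =====
-- stated objective: alternative
-- what changed: A splits the string into a list of fields, guards on len != 8, then loops over the fields converting and range-checking each; B never builds a field list: it does one left-to-right character scan with a field accumulator, validating the current field at each semicolon boundary and checking the running field count once at the end.
import Mathlib
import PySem

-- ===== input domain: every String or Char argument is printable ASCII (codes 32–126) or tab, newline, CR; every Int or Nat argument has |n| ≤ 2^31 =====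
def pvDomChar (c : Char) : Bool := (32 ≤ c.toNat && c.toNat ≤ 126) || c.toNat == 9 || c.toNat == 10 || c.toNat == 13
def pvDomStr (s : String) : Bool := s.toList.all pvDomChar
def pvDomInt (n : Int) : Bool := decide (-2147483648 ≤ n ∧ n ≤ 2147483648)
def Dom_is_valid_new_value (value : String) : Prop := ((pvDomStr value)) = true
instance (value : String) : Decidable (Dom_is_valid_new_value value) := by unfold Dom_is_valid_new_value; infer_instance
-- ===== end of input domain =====

-- B replaces A's split-into-a-list / length-guard / per-field loop by a single left-to-right
-- character scan with a field accumulator: fields are validated at each ';' boundary and the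
-- field count is checked once at the end. Objective: alternative (no list of fields is built).

-- ===== PORT A =====
-- A's for-loop with early returns: per field, int() then range check.
def pvLoopA : List String → Bool
  | [] => true
  | number :: rest =>
    match PySem.Int.ofStr? number with
    | none => false
    | some num => if 0 ≤ num ∧ num ≤ 2000 then pvLoopA rest else false

def is_valid_new_value (value : String) : Bool :=
  let numbers := (PySem.Str.split? (PySem.Str.strip value) ";").getD []  -- sep ";" ≠ "", so split? is always `some` here
  if numbers.length ≠ 8 then false
  else pvLoopA numbers

-- ===== PORT B =====
-- Source B's loop body: state = (remaining chars, count, current field accumulator).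
def pvScanB : List Char → Nat → List Char → Bool
  | [], count, _ => count == 8
  | c :: rest, count, field =>
    if c = ';' then
      match PySem.Int.ofChars? field with   -- int(''.join(field)); ValueError → return False
      | none => false
      | some n => if 0 ≤ n ∧ n ≤ 2000 then pvScanB rest (count + 1) [] else false
    else pvScanB rest count (field ++ [c])

def is_valid_new_value_alt (value : String) : Bool :=
  pvScanB ((PySem.Str.strip value).toList ++ [';']) 0 []

-- ===== PRECONDITION & SPEC =====
def Spec_is_valid_new_value (value : String) (out : Bool) : Prop := out = is_valid_new_value_alt value
instance (value : String) (out : Bool) : Decidable (Spec_is_valid_new_value value out) := by unfold Spec_is_valid_new_value; infer_instance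

-- ===== CLAIM (what is proved, stated in full; the proofs are below) =====
def Claim_equal_is_valid_new_value : Prop := ∀ (value : String), Dom_is_valid_new_value value → Spec_is_valid_new_value value (is_valid_new_value value)

-- ===== LEMMAS AND PROOFS =====
-- Reference splitter: what splitting on the single char ';' produces.
def pvSplit : List Char → List (List Char)
  | [] => [[]]
  | c :: rest =>
    if c = ';' then [] :: pvSplit rest
    else match pvSplit rest with
      | [] => [[c]]
      | y :: ys => (c :: y) :: ys

def pvConsHead (x : List Char) : List (List Char) → List (List Char)
  | [] => [x]
  | y :: ys => (x ++ y) :: ys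

theorem pvSplit_ne_nil (cs : List Char) : pvSplit cs ≠ [] := by
  cases cs with
  | nil => simp [pvSplit]
  | cons c rest =>
    simp only [pvSplit]
    split <;> simp
    split <;> simp

theorem pvConsHead_nil_of_ne (fs : List (List Char)) (h : fs ≠ []) : pvConsHead [] fs = fs := by
  cases fs with
  | nil => exact absurd rfl h
  | cons y ys => simp [pvConsHead]

theorem pvGo_eq (l : List Char) : ∀ (fuel : Nat) (cur : List Char) (acc : List (List Char)),
    l.length < fuel →
    PySem.Chars.splitOn.go [';'] fuel l cur acc = acc.reverse ++ pvConsHead cur.reverse (pvSplit l) := by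
  induction l with
  | nil =>
    intro fuel cur acc h
    cases fuel with
    | zero => omega
    | succ f => simp [PySem.Chars.splitOn.go, pvSplit, pvConsHead]
  | cons c rest ih =>
    intro fuel cur acc h
    cases fuel with
    | zero => omega
    | succ f =>
      have hf : rest.length < f := by simpa using h
      by_cases hc : c = ';'
      · subst hc
        rw [show PySem.Chars.splitOn.go [';'] (f+1) (';' :: rest) cur acc
              = PySem.Chars.splitOn.go [';'] f rest [] (cur.reverse :: acc) by
            simp [PySem.Chars.splitOn.go, List.isPrefixOf]]
        rw [ih f [] (cur.reverse :: acc) hf]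
        cases hs : pvSplit rest with
        | nil => exact absurd hs (pvSplit_ne_nil rest)
        | cons y ys => simp [pvSplit, hs, pvConsHead]
      · rw [show PySem.Chars.splitOn.go [';'] (f+1) (c :: rest) cur acc
              = PySem.Chars.splitOn.go [';'] f rest (c :: cur) acc by
            simp [PySem.Chars.splitOn.go, List.isPrefixOf, Ne.symm hc]]
        rw [ih f (c :: cur) acc hf]
        cases hs : pvSplit rest with
        | nil => exact absurd hs (pvSplit_ne_nil rest)
        | cons y ys => simp [pvSplit, hc, hs, pvConsHead]

theorem pvSplitOn_eq (cs : List Char) : PySem.Chars.splitOn cs [';'] = pvSplit cs := by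
  unfold PySem.Chars.splitOn
  rw [pvGo_eq cs (cs.length + 1) [] [] (by omega)]
  simp [pvConsHead_nil_of_ne _ (pvSplit_ne_nil cs)]

-- what pvScanB computes on a field list, starting from a given count
def pvCheck : List (List Char) → Nat → Bool
  | [], count => count == 8
  | f :: fs, count =>
    match PySem.Int.ofChars? f with
    | none => false
    | some n => if 0 ≤ n ∧ n ≤ 2000 then pvCheck fs (count + 1) else false

theorem pvScanB_eq (cs : List Char) : ∀ (count : Nat) (field : List Char),
    pvScanB (cs ++ [';']) count field = pvCheck (pvConsHead field (pvSplit cs)) count := by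
  induction cs with
  | nil =>
    intro count field
    cases hf : PySem.Int.ofChars? field with
    | none => simp [pvScanB, pvCheck, pvSplit, pvConsHead, hf]
    | some n =>
      by_cases h : 0 ≤ n ∧ n ≤ 2000 <;>
        simp [pvScanB, pvCheck, pvSplit, pvConsHead, hf, h]
  | cons c rest ih =>
    intro count field
    by_cases hc : c = ';'
    · subst hc
      cases hf : PySem.Int.ofChars? field with
      | none => simp [pvScanB, pvCheck, pvSplit, pvConsHead, hf]
      | some n =>
        by_cases h : 0 ≤ n ∧ n ≤ 2000
        · simp only [List.cons_append, pvScanB, hf, if_pos h, ih (count + 1) []]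
          cases hs : pvSplit rest with
          | nil => exact absurd hs (pvSplit_ne_nil rest)
          | cons y ys => simp [pvSplit, hs, pvConsHead, pvCheck, hf, h]
        · simp [pvScanB, pvCheck, pvSplit, pvConsHead, hf, h]
    · simp only [List.cons_append, pvScanB, if_neg hc]
      rw [ih count (field ++ [c])]
      cases hs : pvSplit rest with
      | nil => exact absurd hs (pvSplit_ne_nil rest)
      | cons y ys => simp [pvSplit, hc, hs, pvConsHead]

def pvValid (f : List Char) : Bool :=
  match PySem.Int.ofChars? f with
  | none => false
  | some n => decide (0 ≤ n) && decide (n ≤ 2000)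

theorem pvCheck_eq (fs : List (List Char)) : ∀ (count : Nat),
    pvCheck fs count = (fs.all pvValid && (count + fs.length == 8)) := by
  induction fs with
  | nil => intro count; simp [pvCheck]
  | cons f fs ih =>
    intro count
    simp only [pvCheck, List.all_cons, pvValid]
    cases PySem.Int.ofChars? f with
    | none => simp
    | some n =>
      by_cases h : 0 ≤ n ∧ n ≤ 2000
      · have : count + 1 + fs.length = count + (fs.length + 1) := by omega
        simp [h, ih, this]
      · rcases not_and_or.mp h with h' | h' <;> simp [h']

theorem pvLoopA_eq (fs : List (List Char)) :
    pvLoopA (fs.map String.ofList) = fs.all pvValid := by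
  induction fs with
  | nil => rfl
  | cons f fs ih =>
    simp only [List.map_cons, pvLoopA, PySem.Int.ofStr?, String.toList_ofList,
      List.all_cons, pvValid]
    cases PySem.Int.ofChars? f with
    | none => simp
    | some n =>
      by_cases h : 0 ≤ n ∧ n ≤ 2000
      · simp [h, ih]
      · rcases not_and_or.mp h with h' | h' <;> simp [h']

-- ===== VERDICT (by name: the statement is the Claim_ definition above) =====
theorem is_valid_new_value_spec : Claim_equal_is_valid_new_value := by
  intro value _
  unfold Spec_is_valid_new_value is_valid_new_value is_valid_new_value_alt
  have hsplit : PySem.Str.split? (PySem.Str.strip value) ";"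
      = some ((pvSplit (PySem.Chars.strip value.toList)).map String.ofList) := by
    simp [PySem.Str.split?, PySem.Chars.split?, pvSplitOn_eq, PySem.Str.toList_strip]
  rw [hsplit]
  simp only [Option.getD_some, List.length_map, PySem.Str.toList_strip]
  rw [pvScanB_eq, pvConsHead_nil_of_ne _ (pvSplit_ne_nil _), pvCheck_eq, pvLoopA_eq]
  set S := pvSplit (PySem.Chars.strip value.toList) with hS
  by_cases h : S.length = 8
  · simp [h]
  · simp [h]
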